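-- pv_equiv track=rewrite | github.com/VladimirShubinkin/Polyakov | 5/5.337_3.py | f
-- ===== SOURCE A (Python) =====
-- def to_base(num, base):
--     result = []
--     while num:
--         result = [num % base] + result
--         num //= base
--     return result
--
-- def to_dec(num, base):
--     result = 0
--     for d in num:
--         result = result * base + d
--     return result
--
-- def f(n):
--     n_80 = to_base(n, 80)
--     for i in range(2):
--         sums = [0, 0]
--         for d in n_80:
--             sums[d % 2] += d
--         max_s = to_base(max(sums), 80)
--         last_digit = max_s[-1]
--         n_80.append(last_digit)
--     return to_dec(n_80, 80)
-- ===== SOURCE B (Python) =====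
-- def f(n):
--     s0 = 0
--     s1 = 0
--     m = n
--     while m:
--         d = m % 80
--         if d % 2 == 0:
--             s0 += d
--         else:
--             s1 += d
--         m //= 80
--     d1 = max(s0, s1) % 80
--     if d1 % 2 == 0:
--         s0 += d1
--     else:
--         s1 += d1
--     d2 = max(s0, s1) % 80
--     return n * 6400 + 80 * d1 + d2
-- ===== Notes on version B (the rewrite author's own statement) =====
-- stated objective: simpler
-- what changed: B keeps two running parity sums while dividing n down directly (no digit list), takes each appended digit as max%80, and reconstructs the result with the closed form n*6400 + 80*d1 + d2 instead of building a base-80 digit list twice and reconverting it with to_dec.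
import Mathlib
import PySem

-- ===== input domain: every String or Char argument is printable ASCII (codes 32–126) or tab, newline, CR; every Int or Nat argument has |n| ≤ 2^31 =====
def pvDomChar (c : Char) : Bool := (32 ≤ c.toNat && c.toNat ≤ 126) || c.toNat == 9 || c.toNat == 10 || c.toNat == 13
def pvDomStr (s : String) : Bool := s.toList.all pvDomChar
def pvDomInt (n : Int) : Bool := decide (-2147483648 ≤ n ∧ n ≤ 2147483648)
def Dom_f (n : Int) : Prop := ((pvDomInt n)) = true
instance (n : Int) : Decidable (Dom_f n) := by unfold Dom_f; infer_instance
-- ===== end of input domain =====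

-- B replaces A's twice-rebuilt digit list and to_dec reconversion by two running
-- parity sums and the closed form n*6400 + 80*d1 + d2 (objective: simpler).

-- ===== PORT A =====
-- while num: result = [num % base] + result; num //= base
-- (guard 0 < num ∧ 1 < base makes the loop total; Python diverges for num < 0, outside Pre_)
def toBase (num base : Int) : List Int :=
  if h : 0 < num ∧ 1 < base then
    toBase (PySem.Int.floordiv num base) base ++ [PySem.Int.mod num base]
  else []
termination_by num.toNat
decreasing_by
  have h2 : PySem.Int.floordiv num base < num := by
    rw [PySem.Int.floordiv_lt_iff_lt_mul (by omega)]
    have h3 : num * 2 ≤ num * base := mul_le_mul_of_nonneg_left (by omega) (by omega)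
    omega
  have h1 : 0 ≤ PySem.Int.floordiv num base := by
    rw [PySem.Int.floordiv_eq_ediv_of_pos (by omega)]
    exact Int.ediv_nonneg (by omega) (by omega)
  omega

def toDec (num : List Int) (base : Int) : Int :=
  num.foldl (fun r d => r * base + d) 0

-- sums = [0, 0]; sums[d % 2] += d  (ported as a pair, index 0/1 by d % 2)
def f (n : Int) : Int :=
  let n80 := toBase n 80
  let n80 := (PySem.List.pyRange 0 2 1).foldl (fun lst _ =>
    let sums := lst.foldl
      (fun (s : Int × Int) d =>
        if PySem.Int.mod d 2 = 0 then (s.1 + d, s.2) else (s.1, s.2 + d)) (0, 0)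
    let maxS := toBase (max sums.1 sums.2) 80
    let lastDigit := PySem.List.pyGetD maxS (-1) 0   -- max_s[-1]; nonempty under Pre_
    lst ++ [lastDigit]) n80
  toDec n80 80

-- ===== PORT B =====
-- while m: d = m % 80; add d to the parity sum; m //= 80  (guard 0 < m for totality)
def sumsLoop (m s0 s1 : Int) : Int × Int :=
  if h : 0 < m then
    let d := PySem.Int.mod m 80
    if PySem.Int.mod d 2 = 0 then sumsLoop (PySem.Int.floordiv m 80) (s0 + d) s1
    else sumsLoop (PySem.Int.floordiv m 80) s0 (s1 + d)
  else (s0, s1)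
termination_by m.toNat
decreasing_by
  all_goals rw [PySem.Int.floordiv_eq_ediv_of_pos (by omega)]; omega

def f_alt (n : Int) : Int :=
  let s := sumsLoop n 0 0
  let d1 := PySem.Int.mod (max s.1 s.2) 80
  let s := if PySem.Int.mod d1 2 = 0 then (s.1 + d1, s.2) else (s.1, s.2 + d1)
  let d2 := PySem.Int.mod (max s.1 s.2) 80
  n * 6400 + 80 * d1 + d2

-- ===== PRECONDITION & SPEC =====
-- A raises IndexError on n = 0 and loops forever on n < 0; Pre_ admits exactly n ≥ 1.
def Pre_f (n : Int) : Prop := 1 ≤ n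
instance (n : Int) : Decidable (Pre_f n) := by unfold Pre_f; infer_instance
def pvWitness_f : Int := 12345

def Spec_f (n : Int) (out : Int) : Prop := out = f_alt n
instance (n : Int) (out : Int) : Decidable (Spec_f n out) := by unfold Spec_f; infer_instance

-- ===== CLAIM (what is proved, stated in full; the proofs are below) =====
def Claim_equal_f : Prop := ∀ (n : Int), Dom_f n → Pre_f n → Spec_f n (f n)

-- ===== LEMMAS AND PROOFS =====

-- the parity-sum step shared by both programs
def pstep (s : Int × Int) (d : Int) : Int × Int :=
  if PySem.Int.mod d 2 = 0 then (s.1 + d, s.2) else (s.1, s.2 + d)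

lemma sumsLoop_shift (m s0 s1 : Int) :
    sumsLoop m s0 s1 = (s0 + (sumsLoop m 0 0).1, s1 + (sumsLoop m 0 0).2) := by
  by_cases hm : 0 < m
  · have ih := sumsLoop_shift (PySem.Int.floordiv m 80)
    rw [sumsLoop.eq_def, sumsLoop.eq_def]
    simp only [hm, dif_pos]
    split_ifs with hp
    · rw [ih (s0 + PySem.Int.mod m 80) s1, ih (0 + PySem.Int.mod m 80) 0]
      rw [Prod.ext_iff]
      refine ⟨?_, ?_⟩ <;> dsimp only <;> ring
    · rw [ih s0 (s1 + PySem.Int.mod m 80), ih 0 (0 + PySem.Int.mod m 80)]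
      rw [Prod.ext_iff]
      refine ⟨?_, ?_⟩ <;> dsimp only <;> ring
  · rw [sumsLoop.eq_def, sumsLoop.eq_def]; simp [hm]
termination_by m.toNat
decreasing_by
  all_goals rw [PySem.Int.floordiv_eq_ediv_of_pos (by omega)]; omega

lemma foldl_toBase_eq_sumsLoop (m s0 s1 : Int) :
    (toBase m 80).foldl pstep (s0, s1) = sumsLoop m s0 s1 := by
  by_cases hm : 0 < m
  · have ih := foldl_toBase_eq_sumsLoop (PySem.Int.floordiv m 80) s0 s1
    rw [toBase.eq_def, sumsLoop.eq_def]
    simp only [hm, (by norm_num : (1:Int) < 80), and_self, dif_pos, List.foldl_append,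
      List.foldl_cons, List.foldl_nil, ih]
    rw [sumsLoop_shift (PySem.Int.floordiv m 80) s0 s1]
    unfold pstep
    split_ifs with hp
    · rw [sumsLoop_shift _ (s0 + PySem.Int.mod m 80) s1]
      rw [Prod.ext_iff]
      refine ⟨?_, ?_⟩ <;> dsimp only <;> ring
    · rw [sumsLoop_shift _ s0 (s1 + PySem.Int.mod m 80)]
      rw [Prod.ext_iff]
      refine ⟨?_, ?_⟩ <;> dsimp only <;> ring
  · rw [toBase.eq_def, sumsLoop.eq_def]; simp [hm]
termination_by m.toNat
decreasing_by
  rw [PySem.Int.floordiv_eq_ediv_of_pos (by omega)]; omega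

lemma sumsLoop_pos (m : Int) :
    0 ≤ (sumsLoop m 0 0).1 ∧ 0 ≤ (sumsLoop m 0 0).2 ∧
      (0 < m → 0 < (sumsLoop m 0 0).1 + (sumsLoop m 0 0).2) := by
  by_cases hm : 0 < m
  · have ih := sumsLoop_pos (PySem.Int.floordiv m 80)
    have hd : 0 ≤ PySem.Int.mod m 80 := PySem.Int.mod_nonneg _ (by norm_num)
    have hdm : (PySem.Int.floordiv m 80) * 80 + PySem.Int.mod m 80 = m :=
      PySem.Int.floordiv_mul_add_mod m 80
    have hq : 0 ≤ PySem.Int.floordiv m 80 := by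
      rw [PySem.Int.floordiv_eq_ediv_of_pos (by norm_num)]
      exact Int.ediv_nonneg (by omega) (by norm_num)
    rw [sumsLoop.eq_def]
    simp only [hm, dif_pos]
    rcases ih with ⟨h1, h2, h3⟩
    split_ifs with hp
    · rw [sumsLoop_shift _ (0 + PySem.Int.mod m 80) 0]
      refine ⟨by dsimp only; omega, by dsimp only; omega, fun _ => ?_⟩
      by_cases hq' : 0 < PySem.Int.floordiv m 80
      · have := h3 hq'; dsimp only; omega
      · have hq0 : PySem.Int.floordiv m 80 = 0 := by omega
        rw [hq0] at hdm
        dsimp only; omega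
    · rw [sumsLoop_shift _ 0 (0 + PySem.Int.mod m 80)]
      refine ⟨by dsimp only; omega, by dsimp only; omega, fun _ => ?_⟩
      by_cases hq' : 0 < PySem.Int.floordiv m 80
      · have := h3 hq'; dsimp only; omega
      · have hq0 : PySem.Int.floordiv m 80 = 0 := by omega
        rw [hq0] at hdm
        dsimp only; omega
  · rw [sumsLoop.eq_def]; simp [hm]
termination_by m.toNat
decreasing_by
  rw [PySem.Int.floordiv_eq_ediv_of_pos (by omega)]; omega

lemma toDec_toBase (m : Int) (hm : 0 ≤ m) : toDec (toBase m 80) 80 = m := by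
  by_cases h0 : 0 < m
  · have hq : 0 ≤ PySem.Int.floordiv m 80 := by
      rw [PySem.Int.floordiv_eq_ediv_of_pos (by norm_num)]
      exact Int.ediv_nonneg (by omega) (by norm_num)
    have ih := toDec_toBase (PySem.Int.floordiv m 80) hq
    have hdm : (PySem.Int.floordiv m 80) * 80 + PySem.Int.mod m 80 = m :=
      PySem.Int.floordiv_mul_add_mod m 80
    rw [toBase.eq_def]
    simp only [h0, (by norm_num : (1:Int) < 80), and_self, dif_pos]
    unfold toDec at ih ⊢
    rw [List.foldl_append, ih]
    simp only [List.foldl_cons, List.foldl_nil]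
    omega
  · have : m = 0 := by omega
    subst this
    rw [toBase.eq_def]; simp [toDec]
termination_by m.toNat
decreasing_by
  rw [PySem.Int.floordiv_eq_ediv_of_pos (by omega)]; omega

lemma last_toBase (m : Int) (hm : 0 < m) :
    PySem.List.pyGetD (toBase m 80) (-1) 0 = PySem.Int.mod m 80 := by
  rw [toBase.eq_def]
  simp only [hm, (by norm_num : (1:Int) < 80), and_self, dif_pos]
  exact PySem.List.pyGetD_neg_one_append_singleton _ _ _

-- ===== VERDICT (by name: the statement is the Claim_ definition above) =====
theorem f_spec : Claim_equal_f := by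
  intro n _ hn
  unfold Pre_f at hn
  unfold Spec_f f f_alt
  have h2 : PySem.List.pyRange 0 2 1 = [0, 1] := by decide
  rw [h2]
  simp only [List.foldl_cons, List.foldl_nil]
  have hl : (fun (s : Int × Int) d =>
      if PySem.Int.mod d 2 = 0 then (s.1 + d, s.2) else (s.1, s.2 + d)) = pstep := rfl
  rw [hl]
  set s := sumsLoop n 0 0 with hs
  have hfold1 : (toBase n 80).foldl pstep (0, 0) = s := foldl_toBase_eq_sumsLoop n 0 0
  obtain ⟨hs1, hs2, hs3⟩ := sumsLoop_pos n
  rw [← hs] at hs1 hs2 hs3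
  have hspos := hs3 (by omega)
  have hmax1 : 0 < max s.1 s.2 := by
    rcases le_total s.1 s.2 with h | h
    · rw [max_eq_right h]; omega
    · rw [max_eq_left h]; omega
  rw [hfold1]
  set d1 := PySem.Int.mod (max s.1 s.2) 80 with hd1def
  have hld1 : PySem.List.pyGetD (toBase (max s.1 s.2) 80) (-1) 0 = d1 :=
    last_toBase _ hmax1
  rw [hld1]
  rw [List.foldl_append, hfold1]
  simp only [List.foldl_cons, List.foldl_nil]
  have hd1nn : 0 ≤ d1 := PySem.Int.mod_nonneg _ (by norm_num)
  set s' := pstep s d1 with hs'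
  have hs'cases : s' = if PySem.Int.mod d1 2 = 0 then (s.1 + d1, s.2) else (s.1, s.2 + d1) := rfl
  have hs'1 : 0 ≤ s'.1 ∧ 0 ≤ s'.2 ∧ 0 < s'.1 + s'.2 := by
    rw [hs'cases]; split_ifs <;> dsimp only <;> omega
  have hmax2 : 0 < max s'.1 s'.2 := by
    rcases le_total s'.1 s'.2 with h | h
    · rw [max_eq_right h]; omega
    · rw [max_eq_left h]; omega
  have hld2 : PySem.List.pyGetD (toBase (max s'.1 s'.2) 80) (-1) 0 =
      PySem.Int.mod (max s'.1 s'.2) 80 := last_toBase _ hmax2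
  rw [hld2]
  unfold toDec
  rw [List.foldl_append, List.foldl_append]
  have hdec : (toBase n 80).foldl (fun r d => r * 80 + d) 0 = n := toDec_toBase n (by omega)
  rw [hdec]
  simp only [List.foldl_cons, List.foldl_nil]
  rw [← hs'cases]
  ring
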